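-- pv_equiv track=rewrite | github.com/narjoDev/advent-of-code-2025 | 03/solution.py | max_joltage_flexible
-- ===== SOURCE A (Python) =====
-- from typing import List
--
-- def max_joltage_flexible(bank: List[int], number_batteries: int) -> int:
--     remaining = number_batteries
--     total = 0
--
--     first_available_index = 0
--
--     while remaining > 0:
--         last_available_next_index = len(bank) - remaining
--         next_digit_index = last_available_next_index
--
--         # find the earliest instance of the highest remaining number
--         for i in range(next_digit_index - 1, first_available_index - 1, -1):
--             if bank[i] >= bank[next_digit_index]:
--                 next_digit_index = i
--
--         total = total * 10 + bank[next_digit_index]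
--         first_available_index = next_digit_index + 1
--         remaining -= 1
--
--     return total
-- ===== SOURCE B (Python) =====
-- from typing import List
--
-- def max_joltage_flexible(bank: List[int], number_batteries: int) -> int:
--     # Monotonic-stack greedy: allow len(bank) - number_batteries drops.
--     drops = len(bank) - number_batteries
--     stack = []
--     for x in bank:
--         while drops > 0 and stack and stack[-1] < x:
--             stack.pop()
--             drops -= 1
--         stack.append(x)
--     total = 0
--     for d in stack[:max(0, number_batteries)]:
--         total = total * 10 + d
--     return total
-- ===== Notes on version B (the rewrite author's own statement) =====
-- stated objective: faster
-- what changed: Replaced the per-digit backward window scan (one O(n) scan per selected digit) by a single left-to-right monotonic-stack pass with len(bank)-k allowed drops, then taking the first k stack entries.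
-- outside the precondition, e.g. on max_joltage_flexible([5], 2): A returns 55, B returns 5
import Mathlib
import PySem

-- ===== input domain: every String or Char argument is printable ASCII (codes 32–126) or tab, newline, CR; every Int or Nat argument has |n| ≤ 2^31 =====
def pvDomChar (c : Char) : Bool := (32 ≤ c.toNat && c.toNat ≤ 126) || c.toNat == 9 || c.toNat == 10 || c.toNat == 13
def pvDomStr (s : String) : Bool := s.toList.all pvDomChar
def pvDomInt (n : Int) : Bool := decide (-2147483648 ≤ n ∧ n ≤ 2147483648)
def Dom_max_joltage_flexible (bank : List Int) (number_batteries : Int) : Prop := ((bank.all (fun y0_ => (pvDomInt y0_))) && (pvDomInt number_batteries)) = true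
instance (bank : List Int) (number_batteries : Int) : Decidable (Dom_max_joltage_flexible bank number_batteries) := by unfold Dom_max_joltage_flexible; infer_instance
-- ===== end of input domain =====

-- B replaces A's per-digit backward window scan by a single monotonic-stack pass
-- with len(bank) - number_batteries allowed drops (objective: faster).


-- ===== PORT A =====
-- A's while-loop: fuel = remaining.toNat (the loop runs while remaining > 0,
-- decrementing by 1); `first` is the Int first_available_index, `total` the accumulator.
def pvAStep (bank : List Int) : Nat → Int → Int → Int
  | 0, _, total => total
  | r + 1, first, total =>
    let next0 : Int := (bank.length : Int) - ((r : Int) + 1)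
    let j := (PySem.List.pyRange (next0 - 1) (first - 1) (-1)).foldl
        (fun nd i => if PySem.List.pyGetD bank i 0 ≥ PySem.List.pyGetD bank nd 0 then i else nd) next0
    pvAStep bank r (j + 1) (total * 10 + PySem.List.pyGetD bank j 0)

def max_joltage_flexible (bank : List Int) (number_batteries : Int) : Int :=
  pvAStep bank number_batteries.toNat 0 0

-- ===== PORT B =====
-- Source B's inner `while drops > 0 and stack and stack[-1] < x: stack.pop(); drops -= 1`
-- (stack kept top-first here, so Python's append/pop at the end act on the head).
def pvPop : List Int → Int → Int → List Int × Int
  | [], d, _ => ([], d)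
  | t :: rest, d, x => if 0 < d ∧ t < x then pvPop rest (d - 1) x else (t :: rest, d)

-- Source B's loop body: pop, then `stack.append(x)`.
def pvStep (s : List Int × Int) (x : Int) : List Int × Int :=
  let p := pvPop s.1 s.2 x
  (x :: p.1, p.2)

def max_joltage_flexible_alt (bank : List Int) (number_batteries : Int) : Int :=
  let st := (bank.foldl pvStep ([], (bank.length : Int) - number_batteries)).1
  -- Python's stack[:max(0, number_batteries)] is the bottom-first prefix, i.e. take on the reverse
  (st.reverse.take (max 0 number_batteries).toNat).foldl (fun t d => t * 10 + d) 0

-- ===== PRECONDITION & SPEC =====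
-- Pre_ restricts to the task's natural domain number_batteries ≤ len(bank): beyond it A
-- either raises IndexError (number_batteries > 2*len(bank)) or returns a value produced by
-- Python's negative-index wraparound (len(bank) < number_batteries ≤ 2*len(bank)).
def Pre_max_joltage_flexible (bank : List Int) (number_batteries : Int) : Prop :=
  number_batteries ≤ (bank.length : Int)
instance (bank : List Int) (number_batteries : Int) : Decidable (Pre_max_joltage_flexible bank number_batteries) := by unfold Pre_max_joltage_flexible; infer_instance

def pvWitness_max_joltage_flexible : List Int × Int := ([3, 1, 4], 2)

def Spec_max_joltage_flexible (bank : List Int) (number_batteries : Int) (out : Int) : Prop := out = max_joltage_flexible_alt bank number_batteries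
instance (bank : List Int) (number_batteries : Int) (out : Int) : Decidable (Spec_max_joltage_flexible bank number_batteries out) := by unfold Spec_max_joltage_flexible; infer_instance

-- ===== CLAIM (what is proved, stated in full; the proofs are below) =====
def Claim_equal_max_joltage_flexible : Prop := ∀ (bank : List Int) (number_batteries : Int), Dom_max_joltage_flexible bank number_batteries → Pre_max_joltage_flexible bank number_batteries → Spec_max_joltage_flexible bank number_batteries (max_joltage_flexible bank number_batteries)

-- ===== LEMMAS AND PROOFS =====

-- leftmost maximum of x :: t, as (index, value); mirrors A's right-to-left ≥ scan
def pvPick : Int → List Int → Nat × Int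
  | x, [] => (0, x)
  | x, y :: t =>
    let p := pvPick y t
    if x ≥ p.2 then (0, x) else (p.1 + 1, p.2)

-- the greedy selection both programs compute, as a recursive function
def pvSel : List Int → Nat → List Int
  | _, 0 => []
  | s, r + 1 =>
    match s.take (s.length - r) with
    | [] => []
    | x :: t =>
      let p := pvPick x t
      p.2 :: pvSel (s.drop (p.1 + 1)) r

theorem pvPick_fst_le (x : Int) (t : List Int) : (pvPick x t).1 ≤ t.length := by
  induction t generalizing x with
  | nil => simp [pvPick]
  | cons y t ih =>
    simp only [pvPick]
    split <;> simp [Nat.succ_le_succ (ih y)]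

theorem pvPick_getD (x : Int) (t : List Int) : (x :: t).getD (pvPick x t).1 0 = (pvPick x t).2 := by
  induction t generalizing x with
  | nil => simp [pvPick]
  | cons y t ih =>
    simp only [pvPick]
    split
    · simp
    · simpa [List.getD_cons_succ] using ih y

theorem pvPick_le (x : Int) (t : List Int) : ∀ z ∈ x :: t, z ≤ (pvPick x t).2 := by
  induction t generalizing x with
  | nil => simp [pvPick]
  | cons y t ih =>
    intro z hz
    simp only [pvPick]
    rcases List.mem_cons.1 hz with rfl | hz'
    · split <;> omega
    · have := ih y z hz'
      split <;> omega

theorem pvPick_lt_before (x : Int) (t : List Int) :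
    ∀ i < (pvPick x t).1, (x :: t).getD i 0 < (pvPick x t).2 := by
  induction t generalizing x with
  | nil => simp [pvPick]
  | cons y t ih =>
    intro i hi
    simp only [pvPick] at hi ⊢
    by_cases hx : x ≥ (pvPick y t).2
    · rw [if_pos hx] at hi; omega
    · rw [if_neg hx] at hi ⊢
      cases i with
      | zero => simpa using by omega
      | succ i =>
        have := ih y i (by simpa using hi)
        simpa [List.getD_cons_succ] using this

theorem pvPop_mem (st : List Int) (d x : Int) : ∀ z ∈ (pvPop st d x).1, z ∈ st := by
  induction st generalizing d with
  | nil => simp [pvPop]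
  | cons t rest ih =>
    simp only [pvPop]
    split
    · intro z hz; exact List.mem_cons_of_mem _ (ih _ z hz)
    · simp

theorem pvPop_len (st : List Int) (d x : Int) :
    ((pvPop st d x).1.length : Int) = st.length - (d - (pvPop st d x).2) := by
  induction st generalizing d with
  | nil => simp [pvPop]
  | cons t rest ih =>
    simp only [pvPop]
    split
    · have := ih (d - 1)
      simp only [List.length_cons]
      push_cast at this ⊢
      omega
    · simp

theorem pvPop_nonneg (st : List Int) (d x : Int) (h : 0 ≤ d) : 0 ≤ (pvPop st d x).2 := by
  induction st generalizing d with
  | nil => simpa [pvPop]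
  | cons t rest ih =>
    simp only [pvPop]
    split
    · exact ih (d - 1) (by omega)
    · simpa

theorem pvPop_all (st : List Int) (d x : Int) (h1 : ∀ z ∈ st, z < x)
    (h2 : (st.length : Int) ≤ d) : pvPop st d x = ([], d - st.length) := by
  induction st generalizing d with
  | nil => simp [pvPop]
  | cons t rest ih =>
    have hlen : ((t :: rest).length : Int) = rest.length + 1 := by simp
    simp only [pvPop]
    rw [if_pos ⟨by omega, h1 t (by simp)⟩]
    rw [ih (d - 1) (fun z hz => h1 z (List.mem_cons_of_mem _ hz)) (by omega)]
    simp only [Prod.mk.injEq, List.length_cons]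
    refine ⟨trivial, ?_⟩
    omega

theorem pvRun_mem (ys : List Int) : ∀ (s : List Int × Int), ∀ z ∈ (ys.foldl pvStep s).1, z ∈ ys ∨ z ∈ s.1 := by
  induction ys with
  | nil => simp
  | cons y t ih =>
    intro s z hz
    rcases ih (pvStep s y) z hz with h | h
    · exact Or.inl (List.mem_cons_of_mem _ h)
    · simp only [pvStep] at h
      rcases List.mem_cons.1 h with rfl | h'
      · exact Or.inl (by simp)
      · exact Or.inr (pvPop_mem _ _ _ z h')

theorem pvRun_len (ys : List Int) : ∀ (s : List Int × Int),
    (((ys.foldl pvStep s).1.length : Int) + (s.2 - (ys.foldl pvStep s).2)) = s.1.length + ys.length := by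
  induction ys with
  | nil => simp
  | cons y t ih =>
    intro s
    have h1 := ih (pvStep s y)
    have h2 := pvPop_len s.1 s.2 y
    simp only [pvStep] at h1
    simp only [List.foldl_cons, pvStep]
    simp only [List.length_cons] at h1 h2 ⊢
    push_cast at h1 h2 ⊢
    omega

theorem pvRun_nonneg (ys : List Int) : ∀ (s : List Int × Int), 0 ≤ s.2 → 0 ≤ (ys.foldl pvStep s).2 := by
  induction ys with
  | nil => intro s h; simpa
  | cons y t ih =>
    intro s h
    exact ih (pvStep s y) (pvPop_nonneg s.1 s.2 y h)

theorem pvPop_bottom (st : List Int) (d y b : Int) (h : (st.length : Int) < d → y ≤ b) :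
    pvPop (st ++ [b]) d y = ((pvPop st d y).1 ++ [b], (pvPop st d y).2) := by
  induction st generalizing d with
  | nil =>
    have hnc : ¬ (0 < d ∧ b < y) := by
      intro ⟨hd, hby⟩
      have := h (by simpa using hd)
      omega
    simp [pvPop, hnc]
  | cons t rest ih =>
    simp only [List.cons_append, pvPop]
    split
    · exact ih (d - 1) (by
        intro hl
        apply h
        simp only [List.length_cons]
        push_cast at hl ⊢
        omega)
    · rfl

theorem pvRun_bottom (ys : List Int) : ∀ (st : List Int) (d b : Int),
    (∀ z ∈ ys.take (d - st.length).toNat, z ≤ b) →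
    ys.foldl pvStep (st ++ [b], d) = ((ys.foldl pvStep (st, d)).1 ++ [b], (ys.foldl pvStep (st, d)).2) := by
  induction ys with
  | nil => intro st d b _; simp
  | cons y t ih =>
    intro st d b hcond
    have hy : (st.length : Int) < d → y ≤ b := by
      intro hl
      exact hcond y (by
        have : (d - st.length).toNat = (d - st.length - 1).toNat + 1 := by omega
        rw [this, List.take_succ_cons]; simp)
    simp only [List.foldl_cons]
    have hstep : pvStep (st ++ [b], d) y = ((pvStep (st, d) y).1 ++ [b], (pvStep (st, d) y).2) := by
      simp only [pvStep, pvPop_bottom st d y b hy, List.cons_append]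
    rw [hstep]
    have hplen := pvPop_len st d y
    refine ih ((pvStep (st, d) y).1) ((pvStep (st, d) y).2) b ?_
    intro z hz
    refine hcond z ?_
    simp only [pvStep] at hz ⊢
    have hle : ((pvPop st d y).2 - ((y :: (pvPop st d y).1).length : Int)).toNat ≤ (d - st.length - 1).toNat := by
      simp only [List.length_cons] at hplen ⊢
      push_cast at hplen ⊢
      omega
    have : (d - st.length).toNat = (d - st.length - 1).toNat + 1 ∨ (d - (st.length:Int)).toNat = 0 := by omega
    rcases this with h1 | h1
    · rw [h1, List.take_succ_cons]
      exact List.mem_cons_of_mem _ ((List.take_prefix_take_left (h := hle) (l := t)).subset hz)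
    · exfalso
      have : ((pvPop st d y).2 - ((y :: (pvPop st d y).1).length : Int)).toNat = 0 := by
        simp only [List.length_cons] at hplen ⊢; push_cast at hplen ⊢; omega
      rw [this] at hz; simp at hz

theorem pvRun_decomp (s : List Int) (d : Int) (x : Int) (t : List Int)
    (h0 : 0 ≤ d) (h1 : d < s.length) (hw : s.take (d.toNat + 1) = x :: t) :
    s.foldl pvStep ([], d) =
      (((s.drop ((pvPick x t).1 + 1)).foldl pvStep ([], d - (pvPick x t).1)).1 ++ [(pvPick x t).2],
       ((s.drop ((pvPick x t).1 + 1)).foldl pvStep ([], d - (pvPick x t).1)).2) := by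
  set j := (pvPick x t).1 with hj
  set m := (pvPick x t).2 with hm
  have hlen_s : d.toNat + 1 ≤ s.length := by omega
  have hlen_w : t.length = d.toNat := by
    have : (x :: t).length = (s.take (d.toNat + 1)).length := by rw [hw]
    simp [List.length_take] at this
    omega
  have hjt : j ≤ t.length := pvPick_fst_le x t
  have hjd : (j : Int) ≤ d := by omega
  have hjlt : j < s.length := by omega
  have hwin : ∀ (i : Nat) (h : i < d.toNat + 1), s[i]'(by omega) = (x :: t)[i]'(by simp; omega) := by
    intro i h
    have h2 : i < (s.take (d.toNat + 1)).length := by simp [List.length_take]; omega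
    calc s[i]'(by omega) = (s.take (d.toNat + 1))[i]'h2 := (List.getElem_take).symm
      _ = (x :: t)[i]'(by simp; omega) := List.getElem_of_eq hw h2
  have hsj : s[j]'hjlt = m := by
    rw [hwin j (by omega)]
    rw [← List.getD_eq_getElem (x :: t) 0 (by simp; omega)]
    exact pvPick_getD x t
  have hsplit : s = s.take j ++ (m :: s.drop (j + 1)) := by
    conv_lhs => rw [← List.take_append_drop j s]
    rw [List.drop_eq_getElem_cons hjlt, hsj]
  have hfold : s.foldl pvStep ([], d)
      = (s.drop (j + 1)).foldl pvStep (pvStep ((s.take j).foldl pvStep ([], d)) m) := by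
    conv_lhs => rw [hsplit]
    rw [List.foldl_append, List.foldl_cons]
  set S0 := (s.take j).foldl pvStep ([], d) with hS0
  have hmem : ∀ z ∈ S0.1, z < m := by
    intro z hz
    rcases pvRun_mem (s.take j) ([], d) z hz with h | h
    · obtain ⟨i, hi, hzi⟩ := List.mem_iff_getElem.1 h
      have hij : i < j := by simp [List.length_take] at hi; omega
      have : z = (x :: t)[i]'(by simp; omega) := by
        rw [← hzi, ← hwin i (by omega)]
        exact List.getElem_take
      rw [this, ← List.getD_eq_getElem (x :: t) 0 (by simp; omega)]
      exact pvPick_lt_before x t i hij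
    · simp at h
  have hlen0 := pvRun_len (s.take j) ([], d)
  have hn0 := pvRun_nonneg (s.take j) ([], d) h0
  rw [← hS0] at hlen0 hn0
  have hlentake : (s.take j).length = j := by simp [List.length_take]; omega
  rw [hlentake] at hlen0
  simp only [List.length_nil, Nat.cast_zero, zero_add] at hlen0
  have hle0 : ((S0.1.length : Int)) ≤ S0.2 := by omega
  have hstep : pvStep S0 m = ([m], d - j) := by
    simp only [pvStep, pvPop_all S0.1 S0.2 m hmem hle0]
    have : S0.2 - (S0.1.length : Int) = d - j := by omega
    rw [this]
  rw [hfold, hstep]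
  have hcond : ∀ z ∈ (s.drop (j + 1)).take ((d - j - (([] : List Int).length : Int)).toNat), z ≤ m := by
    intro z hz
    obtain ⟨i, hi, hzi⟩ := List.mem_iff_getElem.1 hz
    simp only [List.length_nil, Nat.cast_zero, Int.sub_zero, List.length_take, List.length_drop] at hi
    have hidx : j + 1 + i < d.toNat + 1 := by omega
    have : z = s[j + 1 + i]'(by omega) := by
      rw [← hzi]
      rw [List.getElem_take, List.getElem_drop]
    rw [this, hwin (j + 1 + i) hidx]
    exact pvPick_le x t _ (List.getElem_mem _)
  have := pvRun_bottom (s.drop (j + 1)) [] (d - j) m hcond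
  simp only [List.nil_append] at this
  rw [this]

theorem pvRun_sel : ∀ (r : Nat) (s : List Int), r ≤ s.length →
    ((s.foldl pvStep ([], (s.length : Int) - r)).1).reverse.take r = pvSel s r := by
  intro r
  induction r with
  | zero => intro s _; simp [pvSel]
  | succ r ih =>
    intro s hr
    simp only [Nat.cast_add, Nat.cast_one]
    set d : Int := (s.length : Int) - ((r : Int) + 1) with hd
    have h0 : 0 ≤ d := by omega
    have h1 : d < s.length := by omega
    have hdt : d.toNat + 1 = s.length - r := by omega
    cases hw : s.take (s.length - r) with
    | nil =>
      exfalso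
      have := congrArg List.length hw
      simp only [List.length_take, List.length_nil] at this
      omega
    | cons x t =>
      have hw' : s.take (d.toNat + 1) = x :: t := by rw [hdt]; exact hw
      have hjt : (pvPick x t).1 ≤ t.length := pvPick_fst_le x t
      have hlen_w : t.length = d.toNat := by
        have := congrArg List.length hw'
        simp only [List.length_take, List.length_cons] at this
        omega
      have hrw := pvRun_decomp s d x t h0 h1 hw'
      rw [hrw]
      simp only [List.reverse_append, List.reverse_cons, List.reverse_nil, List.nil_append,
        List.cons_append, List.take_succ_cons]
      have hbudget : d - ((pvPick x t).1 : Int)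
          = ((s.drop ((pvPick x t).1 + 1)).length : Int) - r := by
        simp only [List.length_drop]
        omega
      rw [hbudget, ih (s.drop ((pvPick x t).1 + 1)) (by simp only [List.length_drop]; omega)]
      conv_rhs => rw [pvSel]
      rw [hw]


theorem pvScan (bank : List Int) : ∀ (q f : Nat), f + q < bank.length →
    ∀ (x : Int) (t : List Int), (bank.drop f).take (q + 1) = x :: t →
    (List.foldr (fun i nd => if PySem.List.pyGetD bank i 0 ≥ PySem.List.pyGetD bank nd 0 then i else nd)
        ((f + q : Nat) : Int) (PySem.List.pyRange (f : Int) ((f + q : Nat) : Int) 1)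
      = ((f + (pvPick x t).1 : Nat) : Int))
    ∧ PySem.List.pyGetD bank ((f + (pvPick x t).1 : Nat) : Int) 0 = (pvPick x t).2 := by
  intro q
  induction q with
  | zero =>
    intro f hf x t hw
    have hflt : f < bank.length := by omega
    rw [List.drop_eq_getElem_cons hflt, List.take_succ_cons, List.take_zero] at hw
    injection hw with h1 h2
    subst h2
    subst h1
    constructor
    · rw [PySem.List.pyRange_one_eq_nil (by push_cast; omega)]
      simp [pvPick]
    · simp only [pvPick, Nat.add_zero]
      rw [PySem.List.pyGetD_natCast, List.getD_eq_getElem bank 0 hflt]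
  | succ q ihq =>
    intro f hf x t hw
    have hflt : f < bank.length := by omega
    rw [List.drop_eq_getElem_cons hflt, List.take_succ_cons] at hw
    injection hw with h1 h2
    cases ht : (bank.drop (f + 1)).take (q + 1) with
    | nil =>
      exfalso
      have := congrArg List.length ht
      simp only [List.length_take, List.length_drop, List.length_nil] at this
      omega
    | cons y t' =>
      rw [ht] at h2
      subst h2
      subst h1
      obtain ⟨ih1, ih2⟩ := ihq (f + 1) (by omega) y t' ht
      have e1 : ((f + (q + 1) : Nat) : Int) = (((f + 1) + q : Nat) : Int) := by push_cast; ring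
      have e2 : ((f : Int) + 1) = ((f + 1 : Nat) : Int) := by push_cast; ring
      have hcons : PySem.List.pyRange (f : Int) ((f + (q + 1) : Nat) : Int) 1
          = (f : Int) :: PySem.List.pyRange ((f : Int) + 1) ((f + (q + 1) : Nat) : Int) 1 :=
        PySem.List.pyRange_one_cons (by push_cast; omega)
      have hgf : PySem.List.pyGetD bank (f : Int) 0 = bank[f]'hflt := by
        rw [PySem.List.pyGetD_natCast, List.getD_eq_getElem bank 0 hflt]
      constructor
      · rw [hcons, List.foldr_cons, e1, e2, ih1]
        simp only [pvPick, hgf, ih2]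
        by_cases hc : bank[f]'hflt ≥ (pvPick y t').2
        · rw [if_pos hc, if_pos hc]
          push_cast; ring
        · rw [if_neg hc, if_neg hc]
          push_cast; ring
      · simp only [pvPick]
        by_cases hc : bank[f]'hflt ≥ (pvPick y t').2
        · rw [if_pos hc]
          simpa using hgf
        · rw [if_neg hc]
          have e3 : ((f + ((pvPick y t').1 + 1) : Nat) : Int) = (((f + 1) + (pvPick y t').1 : Nat) : Int) := by
            push_cast; ring
          rw [e3]
          exact ih2

theorem pvALoop_sel (bank : List Int) : ∀ (r f : Nat) (total : Int), f + r ≤ bank.length →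
    pvAStep bank r ((f : Nat) : Int) total = (pvSel (bank.drop f) r).foldl (fun tt d => tt * 10 + d) total := by
  intro r
  induction r with
  | zero => intro f total _; simp [pvAStep, pvSel]
  | succ r ih =>
    intro f total hfr
    set q : Nat := bank.length - f - (r + 1) with hq
    have hfq : f + q < bank.length := by omega
    cases hw : (bank.drop f).take (q + 1) with
    | nil =>
      exfalso
      have := congrArg List.length hw
      simp only [List.length_take, List.length_drop, List.length_nil] at this
      omega
    | cons x t =>
      have htq : t.length = q := by
        have := congrArg List.length hw
        simp only [List.length_take, List.length_drop, List.length_cons] at this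
        omega
      have hple : (pvPick x t).1 ≤ q := htq ▸ pvPick_fst_le x t
      obtain ⟨hs1, hs2⟩ := pvScan bank q f hfq x t hw
      simp only [pvAStep]
      have hnext : (bank.length : Int) - ((r : Int) + 1) = ((f + q : Nat) : Int) := by
        push_cast; omega
      rw [hnext]
      have hrev : PySem.List.pyRange (((f + q : Nat) : Int) - 1) (((f : Nat) : Int) - 1) (-1)
          = (PySem.List.pyRange ((f : Nat) : Int) ((f + q : Nat) : Int) 1).reverse := by
        rw [PySem.List.pyRange_neg_one_eq_reverse]
        ring_nf
      rw [hrev, List.foldl_reverse, hs1, hs2]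
      have hstep : (((f + (pvPick x t).1 : Nat) : Int) + 1) = ((f + (pvPick x t).1 + 1 : Nat) : Int) := by
        push_cast; ring
      rw [hstep, ih (f + (pvPick x t).1 + 1) (total * 10 + (pvPick x t).2) (by omega)]
      conv_rhs => rw [pvSel]
      have hsc : (bank.drop f).length - r = q + 1 := by
        simp only [List.length_drop]; omega
      rw [hsc, hw]
      simp only [List.foldl_cons]
      congr 1
      rw [List.drop_drop]
      congr 1

-- ===== VERDICT (by name: the statement is the Claim_ definition above) =====
theorem max_joltage_flexible_spec : Claim_equal_max_joltage_flexible := by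
  intro bank k _ hpre
  unfold Pre_max_joltage_flexible at hpre
  unfold Spec_max_joltage_flexible
  unfold max_joltage_flexible max_joltage_flexible_alt
  simp only []
  have hA := pvALoop_sel bank k.toNat 0 0 (by omega)
  simp only [Nat.cast_zero, List.drop_zero] at hA
  rw [hA]
  by_cases hk : k ≤ 0
  · have h1 : (max 0 k).toNat = 0 := by omega
    have h2 : k.toNat = 0 := by omega
    rw [h1, h2]
    simp [pvSel]
  · have h1 : (max 0 k).toNat = k.toNat := by omega
    have h2 : (bank.length : Int) - k = (bank.length : Int) - (k.toNat : Int) := by omega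
    rw [h1, h2, pvRun_sel k.toNat bank (by omega)]
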